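-- pv_equiv track=rewrite | github.com/swiftkeyy/study-ai-bot | ai.py | _merge_provider_order
-- ===== SOURCE A (Python) =====
-- from typing import Any, Iterable, Optional
--
-- def _normalize_provider_name(name: str) -> str:
--     value = (name or "").strip().lower()
--     if value in {"mistral", "mistralai"}:
--         return "Mistral"
--     if value in {"openrouter", "or"}:
--         return "OpenRouter"
--     if value in {"groq"}:
--         return "Groq"
--     if value in {"gemini", "google"}:
--         return "Gemini"
--     return name
--
-- def _merge_provider_order(provider_order: Optional[Iterable[str]], defaults: list[str]) -> list[str]:
--     order = list(defaults)
--     if provider_order: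
--         cleaned: list[str] = []
--         for item in provider_order:
--             normalized = _normalize_provider_name(item)
--             if normalized in defaults and normalized not in cleaned:
--                 cleaned.append(normalized)
--         if cleaned:
--             order = cleaned + [item for item in defaults if item not in cleaned]
--     return order
-- ===== SOURCE B (Python) =====
-- def _normalize_provider_name(name: str) -> str:
--     value = (name or "").strip().lower()
--     if value in {"mistral", "mistralai"}:
--         return "Mistral"
--     if value in {"openrouter", "or"}:
--         return "OpenRouter"
--     if value in {"groq"}:
--         return "Groq"
--     if value in {"gemini", "google"}:
--         return "Gemini"
--     return name
--
--
-- def _merge_provider_order(provider_order, defaults):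
--     if not provider_order:
--         return list(defaults)
--     # first-occurrence rank of every normalized requested provider
--     rank = {}
--     for i, item in enumerate(provider_order):
--         rank.setdefault(_normalize_provider_name(item), i)
--     present = sorted((d for d in dict.fromkeys(defaults) if d in rank),
--                      key=lambda d: rank[d])
--     absent = [d for d in defaults if d not in rank]
--     return present + absent
-- ===== Notes on version B (the rewrite author's own statement) =====
-- stated objective: faster
-- what changed: Replaces the nested membership scans (normalized in defaults / in cleaned, then a filter against cleaned) by a first-occurrence rank dict built in one pass over provider_order, after which the present defaults are obtained by a stable sort of the deduplicated defaults keyed by that rank and the absent ones by a single O(1)-lookup filter.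
import Mathlib
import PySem

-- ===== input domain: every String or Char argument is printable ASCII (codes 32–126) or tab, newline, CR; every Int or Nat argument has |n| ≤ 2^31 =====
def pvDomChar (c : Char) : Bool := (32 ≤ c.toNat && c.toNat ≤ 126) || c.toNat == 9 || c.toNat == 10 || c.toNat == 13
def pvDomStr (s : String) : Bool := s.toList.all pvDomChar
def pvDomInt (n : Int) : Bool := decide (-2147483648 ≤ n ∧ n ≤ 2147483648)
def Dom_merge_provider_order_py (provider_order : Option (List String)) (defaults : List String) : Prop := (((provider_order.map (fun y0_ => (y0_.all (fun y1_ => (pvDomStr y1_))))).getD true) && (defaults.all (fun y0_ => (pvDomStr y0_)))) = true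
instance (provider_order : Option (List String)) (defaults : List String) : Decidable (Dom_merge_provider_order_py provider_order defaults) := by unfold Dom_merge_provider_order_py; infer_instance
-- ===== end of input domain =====

-- B replaces A's nested membership scans by a one-pass first-occurrence rank dict plus a stable
-- sort of the deduplicated defaults keyed by that rank (objective: faster).

-- ===== PORT A =====
-- shared module helper _normalize_provider_name; `(name or "")` equals `name` for strings
-- (the empty string strips/lowers to itself), so it is ported as `name`.
def pvNormalize (name : String) : String :=
  let value := PySem.Str.lower (PySem.Str.strip name)
  if value = "mistral" ∨ value = "mistralai" then "Mistral"
  else if value = "openrouter" ∨ value = "or" then "OpenRouter"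
  else if value = "groq" then "Groq"
  else if value = "gemini" ∨ value = "google" then "Gemini"
  else name

def merge_provider_order_py (provider_order : Option (List String)) (defaults : List String) : List String :=
  let order := defaults
  match provider_order with
  | none => order
  | some lst =>
    if lst = [] then order
    else
      let cleaned := lst.foldl (fun cleaned item =>
        let normalized := pvNormalize item
        if normalized ∈ defaults ∧ normalized ∉ cleaned then cleaned ++ [normalized]
        else cleaned) ([] : List String)
      if cleaned = [] then order
      else cleaned ++ defaults.filter (fun d => decide (d ∉ cleaned))

-- ===== PORT B =====
def merge_provider_order_py_alt (provider_order : Option (List String)) (defaults : List String) : List String :=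
  match provider_order with
  | none => defaults
  | some lst =>
    if lst = [] then defaults
    else
      -- rank = {}; for i, item in enumerate(provider_order): rank.setdefault(_normalize_provider_name(item), i)
      let rank : PySem.Dict String Int :=
        (PySem.List.enumerate lst).foldl (fun r p => r.setdefault (pvNormalize p.2) p.1) PySem.Dict.empty
      -- present = sorted((d for d in dict.fromkeys(defaults) if d in rank), key=lambda d: rank[d])
      -- (rank[d] is evaluated only for d in rank, so the total getD with default 0 is exact)
      let present := PySem.List.sorted
        ((PySem.List.dedup defaults).filter (fun d => rank.contains d)) (fun d => rank.getD d 0)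
      -- absent = [d for d in defaults if d not in rank]
      let absent := defaults.filter (fun d => !(rank.contains d))
      present ++ absent

-- ===== PRECONDITION & SPEC =====
def Spec_merge_provider_order_py (provider_order : Option (List String)) (defaults : List String) (out : List String) : Prop := out = merge_provider_order_py_alt provider_order defaults
instance (provider_order : Option (List String)) (defaults : List String) (out : List String) : Decidable (Spec_merge_provider_order_py provider_order defaults out) := by unfold Spec_merge_provider_order_py; infer_instance

-- ===== CLAIM (what is proved, stated in full; the proofs are below) =====
def Claim_equal_merge_provider_order_py : Prop := ∀ (provider_order : Option (List String)) (defaults : List String), Dom_merge_provider_order_py provider_order defaults → Spec_merge_provider_order_py provider_order defaults (merge_provider_order_py provider_order defaults)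

-- ===== LEMMAS AND PROOFS =====

-- idxOf? of a member is some idxOf
theorem pvIdxOf?_eq_some {α : Type} [BEq α] [LawfulBEq α] {l : List α} {a : α} (h : a ∈ l) :
    List.idxOf? a l = some (List.idxOf a l) := by
  induction l with
  | nil => simp at h
  | cons x xs ih =>
    by_cases hx : x = a
    · subst hx; simp [List.idxOf?_cons]
    · have ha : a ∈ xs := by
        rcases List.mem_cons.mp h with h' | h'
        · exact absurd h'.symm hx
        · exact h'
      simp only [List.idxOf?_cons, List.idxOf_cons, beq_iff_eq, hx, if_false, ih ha, Option.map_some]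
      simp [Bool.cond_eq_ite, hx]

-- the rank-building fold of B, characterised: first index of n among the normalised items
theorem pvRankFold (lst : List String) (s : Int) (r : PySem.Dict String Int) (n : String) :
    ((PySem.List.enumerate lst s).foldl (fun r p => r.setdefault (pvNormalize p.2) p.1) r).get? n
      = if r.contains n then r.get? n
        else (PySem.List.index? (lst.map pvNormalize) n).map (fun k => s + (k : Int)) := by
  induction lst generalizing s r with
  | nil =>
    by_cases hn : r.contains n
    · simp [PySem.List.enumerate, hn]
    · have hg : r.get? n = none := by
        cases h : r.get? n with
        | none => rfl
        | some v => exact absurd (by rw [PySem.Dict.contains_eq_isSome_get?, h]; rfl) hn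
      simp [PySem.List.enumerate, hg, hn, PySem.List.index?]
  | cons x xs ih =>
    rw [PySem.List.enumerate_cons]
    simp only [List.foldl_cons]
    by_cases hc : r.contains (pvNormalize x)
    · rw [PySem.Dict.setdefault_of_contains r s hc, ih]
      by_cases hn : r.contains n
      · simp [hn]
      · have hne : pvNormalize x ≠ n := fun h => hn (h ▸ hc)
        rw [if_neg hn, if_neg hn, List.map_cons, PySem.List.index?_cons_of_ne _ hne]
        cases PySem.List.index? (xs.map pvNormalize) n with
        | none => simp
        | some k => simp; ring
    · rw [PySem.Dict.setdefault_of_not_contains r s (by simpa using hc), ih]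
      by_cases hxn : pvNormalize x = n
      · subst hxn
        rw [if_neg hc, List.map_cons, PySem.List.index?_cons_self]
        rw [if_pos (by simp), PySem.Dict.get?_insert_self]

        simp
      · have hcn : ((r.insert (pvNormalize x) s).contains n) = r.contains n := by
          simp [PySem.Dict.contains_insert, Ne.symm hxn]
        rw [hcn, List.map_cons, PySem.List.index?_cons_of_ne _ hxn]
        by_cases hn : r.contains n
        · rw [if_pos hn, if_pos hn, PySem.Dict.get?_insert_of_ne _ _ (Ne.symm hxn)]
        · rw [if_neg hn, if_neg hn]
          cases PySem.List.index? (xs.map pvNormalize) n with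
          | none => simp
          | some k => simp; ring

-- A's cleaned loop is the Set.add fold over the normalised items that are in defaults
theorem pvCleanedFold (defaults lst : List String) (acc : List String) :
    lst.foldl (fun cleaned item =>
        let normalized := pvNormalize item
        if normalized ∈ defaults ∧ normalized ∉ cleaned then cleaned ++ [normalized]
        else cleaned) acc
      = ((lst.map pvNormalize).filter (fun n => decide (n ∈ defaults))).foldl PySem.Set.add acc := by
  induction lst generalizing acc with
  | nil => simp
  | cons x xs ih =>
    simp only [List.foldl_cons, List.map_cons, List.filter_cons]
    by_cases hd : pvNormalize x ∈ defaults
    · have h1 : (if pvNormalize x ∈ defaults ∧ pvNormalize x ∉ acc then acc ++ [pvNormalize x] else acc)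
          = PySem.Set.add acc (pvNormalize x) := by
        by_cases hm : pvNormalize x ∈ acc
        · rw [if_neg (by simp [hm]), PySem.Set.add,
              if_pos (by rw [PySem.Set.contains_iff]; exact hm)]
        · rw [if_pos ⟨hd, hm⟩, PySem.Set.add,
              if_neg (by simp only [PySem.Set.contains_iff]; exact hm)]
      rw [h1, if_pos (by simpa using hd), List.foldl_cons, ih]
    · rw [if_neg (fun hc => hd hc.1), if_neg (by simpa using hd), ih]

-- filtering commutes with the Set.add fold (first-occurrence dedup)
theorem pvFoldAddFilter {α : Type} [BEq α] [LawfulBEq α] (p : α → Bool) (ys acc : List α) :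
    (ys.foldl PySem.Set.add acc).filter p = (ys.filter p).foldl PySem.Set.add (acc.filter p) := by
  induction ys generalizing acc with
  | nil => simp
  | cons y ys ih =>
    simp only [List.foldl_cons, List.filter_cons]
    by_cases hp : p y
    · rw [if_pos hp]
      simp only [List.foldl_cons]
      have h1 : (PySem.Set.add acc y).filter p = PySem.Set.add (acc.filter p) y := by
        by_cases hm : y ∈ acc
        · rw [PySem.Set.add, if_pos (by rw [PySem.Set.contains_iff]; exact hm),
              PySem.Set.add, if_pos (by rw [PySem.Set.contains_iff]; exact List.mem_filter.mpr ⟨hm, hp⟩)]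
        · rw [PySem.Set.add, if_neg (by simp only [PySem.Set.contains_iff]; exact hm),
              PySem.Set.add, if_neg (by simp only [PySem.Set.contains_iff, List.mem_filter]; exact fun h => hm h.1),
              List.filter_append, List.filter_cons, if_pos hp]
          simp
      rw [ih, h1]
    · rw [if_neg hp, ih]
      have h1 : (PySem.Set.add acc y).filter p = acc.filter p := by
        by_cases hm : y ∈ acc
        · rw [PySem.Set.add, if_pos (by rw [PySem.Set.contains_iff]; exact hm)]
        · rw [PySem.Set.add, if_neg (by simp only [PySem.Set.contains_iff]; exact hm),
              List.filter_append, List.filter_cons, if_neg hp]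
          simp
      rw [h1]

theorem pvOfListFilter {α : Type} [BEq α] [LawfulBEq α] (p : α → Bool) (ys : List α) :
    PySem.Set.ofList (ys.filter p) = (PySem.Set.ofList ys).filter p := by
  rw [PySem.Set.ofList_eq_foldl, PySem.Set.ofList_eq_foldl, pvFoldAddFilter]
  rfl

-- the dedup order is the order of first occurrence
theorem pvOfListPairwiseIdx {α : Type} [BEq α] [LawfulBEq α] (ys : List α) :
    (PySem.Set.ofList ys).Pairwise (fun a b => List.idxOf a ys < List.idxOf b ys) := by
  induction ys using List.reverseRecOn with
  | nil => simp [PySem.Set.ofList]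
  | append_singleton zs y ih =>
    have hof : PySem.Set.ofList (zs ++ [y]) = PySem.Set.add (PySem.Set.ofList zs) y := by
      rw [PySem.Set.ofList_eq_foldl, PySem.Set.ofList_eq_foldl, List.foldl_append]
      rfl
    rw [hof]
    have htrans : (PySem.Set.ofList zs).Pairwise
        (fun a b => List.idxOf a (zs ++ [y]) < List.idxOf b (zs ++ [y])) := by
      refine ih.imp_of_mem (fun {a b} ha hb h => ?_)
      rw [List.idxOf_append_of_mem ((PySem.Set.mem_ofList zs a).mp ha),
          List.idxOf_append_of_mem ((PySem.Set.mem_ofList zs b).mp hb)]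
      exact h
    by_cases hm : y ∈ PySem.Set.ofList zs
    · rw [PySem.Set.add, if_pos (by rw [PySem.Set.contains_iff]; exact hm)]
      exact htrans
    · rw [PySem.Set.add, if_neg (by simp only [PySem.Set.contains_iff]; exact hm)]
      refine List.pairwise_append.mpr ⟨htrans, by simp, ?_⟩
      intro a ha b hb
      have hb' : b = y := by simpa using hb
      have hay : a ∈ zs := (PySem.Set.mem_ofList zs a).mp ha
      have hyz : y ∉ zs := fun h => hm ((PySem.Set.mem_ofList zs y).mpr h)
      rw [hb', List.idxOf_append_of_mem hay, List.idxOf_append_of_notMem hyz]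
      calc List.idxOf a zs < zs.length := List.idxOf_lt_length_of_mem hay
        _ ≤ zs.length + List.idxOf y [y] := Nat.le_add_right _ _

-- ===== VERDICT (by name: the statement is the Claim_ definition above) =====
theorem merge_provider_order_py_spec : Claim_equal_merge_provider_order_py := by
  intro po defaults _dom
  unfold Spec_merge_provider_order_py
  cases po with
  | none => rfl
  | some lst =>
    by_cases hl : lst = []
    · simp [merge_provider_order_py, merge_provider_order_py_alt, hl]
    · simp only [merge_provider_order_py, merge_provider_order_py_alt, if_neg hl]
      rw [pvCleanedFold, ← PySem.Set.ofList_eq_foldl]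
      set norms := lst.map pvNormalize with hnorms
      set rank : PySem.Dict String Int :=
        (PySem.List.enumerate lst).foldl (fun r p => r.setdefault (pvNormalize p.2) p.1) PySem.Dict.empty with hrank
      set C : List String := PySem.Set.ofList (norms.filter (fun n => decide (n ∈ defaults))) with hC
      have hget : ∀ n, rank.get? n = (PySem.List.index? norms n).map (fun k => (k : Int)) := by
        intro n
        have hemp : (PySem.Dict.empty : PySem.Dict String Int).contains n = false := rfl
        rw [hrank, pvRankFold, if_neg (by rw [hemp]; exact Bool.false_ne_true)]
        simp [← hnorms]
      have hcont : ∀ n, rank.contains n = true ↔ n ∈ norms := by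
        intro n
        rw [PySem.Dict.contains_eq_isSome_get?, hget n]
        rw [PySem.List.index?_eq_idxOf?]
        cases h : List.idxOf? n norms with
        | none => simpa using List.idxOf?_eq_none_iff.mp h
        | some k =>
          have : n ∈ norms := by
            have := List.isSome_idxOf?.mp (by rw [h]; rfl)
            exact this
          simp [this]
      have hgetD : ∀ n, n ∈ norms → rank.getD n 0 = (List.idxOf n norms : Int) := by
        intro n hn
        have h1 : rank.getD n 0 = (rank.get? n).getD 0 := by
          simp [PySem.Dict.getD, PySem.Dict.get?]
        rw [h1, hget n, PySem.List.index?_eq_idxOf?, pvIdxOf?_eq_some hn]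
        rfl
      have hmemC : ∀ n, n ∈ C ↔ n ∈ norms ∧ n ∈ defaults := by
        intro n
        rw [hC, PySem.Set.mem_ofList]
        simp [List.mem_filter]
      have hCF : C = (PySem.Set.ofList norms).filter (fun n => decide (n ∈ defaults)) := by
        rw [hC, pvOfListFilter]
      have hpairC : C.Pairwise (fun a b => rank.getD a 0 < rank.getD b 0) := by
        have hpair0 := (pvOfListPairwiseIdx norms).filter (fun n => decide (n ∈ defaults))
        rw [← hCF] at hpair0
        refine hpair0.imp_of_mem (fun {a b} ha hb h => ?_)
        rw [hgetD a ((hmemC a).mp ha).1, hgetD b ((hmemC b).mp hb).1]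
        exact_mod_cast h
      have hndC : C.Nodup := by rw [hC]; exact PySem.Set.nodup_ofList _
      have hndF : ((PySem.List.dedup defaults).filter (fun d => rank.contains d)).Nodup := by
        rw [PySem.List.dedup_eq_ofList]
        exact (PySem.Set.nodup_ofList _).filter _
      have hmemF : ∀ x, x ∈ (PySem.List.dedup defaults).filter (fun d => rank.contains d)
          ↔ x ∈ defaults ∧ x ∈ norms := by
        intro x
        rw [PySem.List.dedup_eq_ofList]
        simp [List.mem_filter, PySem.Set.mem_ofList, hcont x]
      have hperm : C.Perm ((PySem.List.dedup defaults).filter (fun d => rank.contains d)) :=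
        (List.perm_ext_iff_of_nodup hndC hndF).mpr (fun a => by rw [hmemC a, hmemF a]; tauto)
      have hsorted : PySem.List.sorted ((PySem.List.dedup defaults).filter (fun d => rank.contains d))
          (fun d => rank.getD d 0) = C :=
        PySem.List.sorted_eq_of_perm_of_pairwise_lt _ C _ hperm hpairC
      have htail : defaults.filter (fun d => !(rank.contains d))
          = defaults.filter (fun d => decide (d ∉ C)) := by
        refine List.filter_congr (fun d hd => ?_)
        by_cases h : d ∈ norms
        · have h1 : rank.contains d = true := (hcont d).mpr h
          have h2 : d ∈ C := (hmemC d).mpr ⟨h, hd⟩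
          rw [h1]
          simp [h2]
        · have h1 : rank.contains d = false := by
            rcases Bool.eq_false_or_eq_true (rank.contains d) with ht | hf
            · exact absurd ((hcont d).mp ht) h
            · exact hf
          have h2 : d ∉ C := fun hc => h ((hmemC d).mp hc).1
          rw [h1]
          simp [h2]
      rw [hsorted, htail]
      by_cases hCe : C = []
      · rw [if_pos hCe, hCe]
        simp
      · rw [if_neg hCe]
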